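-- pv_equiv track=rewrite | github.com/zazabap/problem-reductions | docs/paper/verify-reductions/adversary_k_satisfiability_feasible_register_assignment.py | brute_fra
-- ===== SOURCE A (Python) =====
-- def brute_fra(nv: int, edges: list[tuple[int, int]], regs: list[int]) -> list[int] | None:
--     """Brute force FRA via DFS over topological orderings with pruning."""
--     if nv == 0:
--         return []
--
--     preds: list[set[int]] = [set() for _ in range(nv)]
--     succs: list[set[int]] = [set() for _ in range(nv)]
--     in_deg = [0] * nv
--     for v, u in edges:
--         preds[v].add(u)
--         succs[u].add(v)
--         in_deg[v] += 1
--
--     done: set[int] = set()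
--     order: list[int] = []
--     rem_in = list(in_deg)
--     live: set[int] = set()
--
--     def ok(v: int) -> bool:
--         r = regs[v]
--         for w in live:
--             if regs[w] == r:
--                 if any(s != v and s not in done for s in succs[w]):
--                     return False
--         return True
--
--     def go() -> bool:
--         if len(order) == nv:
--             return True
--         avail = [v for v in range(nv) if v not in done and rem_in[v] == 0 and ok(v)]
--         for v in avail:
--             order.append(v)
--             done.add(v)
--             dead = {w for w in live if succs[w] and succs[w] <= done}
--             live.difference_update(dead)
--             if succs[v] and not succs[v] <= done:
--                 live.add(v)
--             for s in succs[v]: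
--                 rem_in[s] -= 1
--             if go():
--                 return True
--             for s in succs[v]:
--                 rem_in[s] += 1
--             live.discard(v)
--             live.update(dead)
--             done.discard(v)
--             order.pop()
--         return False
--
--     return list(order) if go() else None
-- ===== SOURCE B (Python) =====
-- def brute_fra(nv: int, edges: list[tuple[int, int]], regs: list[int]) -> list[int] | None:
--     """Iterative FRA search: explicit stack of candidate frames; the done set,
--     remaining in-degrees and live set are recomputed from `order` instead of
--     being maintained and undone."""
--     if nv == 0:
--         return []
--
--     preds: list[set[int]] = [set() for _ in range(nv)]
--     succs: list[set[int]] = [set() for _ in range(nv)]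
--     in_deg = [0] * nv
--     for v, u in edges:
--         preds[v].add(u)
--         succs[u].add(v)
--         in_deg[v] += 1
--
--     def ok(v: int, order: list[int]) -> bool:
--         r = regs[v]
--         for w in order:
--             if regs[w] == r and any(s != v and s not in order for s in succs[w]):
--                 return False
--         return True
--
--     def avail(order: list[int]) -> list[int]:
--         return [v for v in range(nv)
--                 if v not in order
--                 and in_deg[v] == sum(1 for u in preds[v] if u in order)
--                 and ok(v, order)]
--
--     order: list[int] = []
--     stack: list[list[int]] = [avail(order)]
--     while stack:
--         if len(order) == nv:
--             return order
--         cands = stack[-1]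
--         if cands:
--             v = cands.pop(0)
--             order.append(v)
--             stack.append(avail(order))
--         else:
--             stack.pop()
--             if order:
--                 order.pop()
--     return None
-- ===== Notes on version B (the rewrite author's own statement) =====
-- stated objective: alternative
-- what changed: A's recursive DFS with four incrementally maintained and undone structures (done set, rem_in counters, live set, order) is replaced by an iterative search driven by an explicit stack of frozen candidate frames whose per-step data (done membership, satisfied in-degree count, live vertices) is recomputed from `order` alone, so backtracking is a plain pop with no undo code.
-- outside the precondition, e.g. on brute_fra(2, [(1, -2)], [0, 0]): A returns [0, 1], B returns None; on brute_fra(2, [(0, 1), (1, 0)], []): A returns None, B returns None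
import Mathlib
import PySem

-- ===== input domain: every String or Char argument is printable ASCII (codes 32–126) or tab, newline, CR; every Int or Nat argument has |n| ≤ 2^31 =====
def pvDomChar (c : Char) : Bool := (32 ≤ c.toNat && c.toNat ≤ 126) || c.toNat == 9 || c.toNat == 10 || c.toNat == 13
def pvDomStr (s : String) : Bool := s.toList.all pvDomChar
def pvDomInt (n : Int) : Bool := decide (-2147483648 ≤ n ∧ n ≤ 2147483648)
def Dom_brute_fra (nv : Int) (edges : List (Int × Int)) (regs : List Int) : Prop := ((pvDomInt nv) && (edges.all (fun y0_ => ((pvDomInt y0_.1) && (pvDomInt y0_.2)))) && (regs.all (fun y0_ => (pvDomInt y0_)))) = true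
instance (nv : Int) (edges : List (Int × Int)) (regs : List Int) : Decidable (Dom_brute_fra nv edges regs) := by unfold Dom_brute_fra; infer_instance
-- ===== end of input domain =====

-- B replaces A's recursive DFS (maintained done/rem_in/live with explicit undo) by an
-- explicit-stack iterative search that recomputes that data from `order`; objective: alternative.


-- ===== PORT A =====
-- Both Pythons build preds/succs/in_deg with the same loop; shared helper.
-- Indexing preds[v] / succs[u] / in_deg[v] is ported with pyGetD/pySetD (exact for the
-- 0 ≤ v,u < nv indices admitted by Pre_brute_fra).
def fraBuild (nv : Int) (edges : List (Int × Int)) :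
    List (PySem.Set Int) × List (PySem.Set Int) × List Int :=
  let n := nv.toNat
  edges.foldl
    (fun st e =>
      (PySem.List.pySetD st.1 e.1 (PySem.Set.add (PySem.List.pyGetD st.1 e.1 PySem.Set.empty) e.2),
       PySem.List.pySetD st.2.1 e.2 (PySem.Set.add (PySem.List.pyGetD st.2.1 e.2 PySem.Set.empty) e.1),
       PySem.List.pySetD st.2.2 e.1 (PySem.List.pyGetD st.2.2 e.1 0 + 1)))
    (List.replicate n PySem.Set.empty, List.replicate n PySem.Set.empty, List.replicate n (0 : Int))

-- A's ok(v): scans `live` (a bool, independent of Python's set-iteration order)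
def fraOkA (regs : List Int) (succs : List (PySem.Set Int))
    (done live : PySem.Set Int) (v : Int) : Bool :=
  let r := PySem.List.pyGetD regs v 0
  !(live.any (fun w =>
      PySem.List.pyGetD regs w 0 == r &&
      (PySem.List.pyGetD succs w PySem.Set.empty).any
        (fun s => s != v && !(PySem.Set.contains done s))))

def fraAvailA (nv : Int) (regs : List Int) (succs : List (PySem.Set Int))
    (done : PySem.Set Int) (rem : List Int) (live : PySem.Set Int) : List Int :=
  (PySem.List.pyRange 0 nv 1).filter (fun v =>
    !(PySem.Set.contains done v) && PySem.List.pyGetD rem v 0 == 0 &&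
    fraOkA regs succs done live v)

-- dead = {w for w in live if succs[w] and succs[w] <= done}; live.difference_update(dead);
-- if succs[v] and not succs[v] <= done: live.add(v)   (done already contains v here)
def fraLiveUpd (succs : List (PySem.Set Int)) (live done' : PySem.Set Int) (v : Int) :
    PySem.Set Int :=
  let dead := live.filter (fun w =>
    !(PySem.List.pyGetD succs w PySem.Set.empty).isEmpty &&
    PySem.Set.issubset (PySem.List.pyGetD succs w PySem.Set.empty) done')
  let live1 := PySem.Set.diff live dead
  if !(PySem.List.pyGetD succs v PySem.Set.empty).isEmpty &&
     !(PySem.Set.issubset (PySem.List.pyGetD succs v PySem.Set.empty) done')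
  then PySem.Set.add live1 v else live1

-- for s in succs[v]: rem_in[s] -= 1   (decrements at distinct indices: any order gives the same list)
def fraRemUpd (succs : List (PySem.Set Int)) (rem : List Int) (v : Int) : List Int :=
  (PySem.List.pyGetD succs v PySem.Set.empty).foldl
    (fun rm s => PySem.List.pySetD rm s (PySem.List.pyGetD rm s 0 - 1)) rem

-- A's `for v in avail: … if go(): return True … (undo)`: the functional port passes the
-- per-branch state, so Python's explicit undo statements are the return to `done order rem live`.
def fraTryA (recur : PySem.Set Int → List Int → List Int → PySem.Set Int → Option (List Int))
    (succs : List (PySem.Set Int)) (done : PySem.Set Int) (order : List Int)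
    (rem : List Int) (live : PySem.Set Int) : List Int → Option (List Int)
  | [] => none
  | v :: vs =>
    match recur (PySem.Set.add done v) (order ++ [v]) (fraRemUpd succs rem v)
        (fraLiveUpd succs live (PySem.Set.add done v) v) with
    | some res => some res
    | none => fraTryA recur succs done order rem live vs

-- go(); fuel nv.toNat+1 bounds the recursion depth (order grows by one fresh vertex per level)
def fraGoA (nv : Int) (regs : List Int) (succs : List (PySem.Set Int)) :
    Nat → PySem.Set Int → List Int → List Int → PySem.Set Int → Option (List Int)
  | 0, _, _, _, _ => none
  | f + 1, done, order, rem, live =>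
    if PySem.List.len order = nv then some order
    else fraTryA (fraGoA nv regs succs f) succs done order rem live
      (fraAvailA nv regs succs done rem live)

def brute_fra (nv : Int) (edges : List (Int × Int)) (regs : List Int) : Option (List Int) :=
  if nv = 0 then some [] else
    match fraGoA nv regs (fraBuild nv edges).2.1 (nv.toNat + 1) PySem.Set.empty []
        (fraBuild nv edges).2.2 PySem.Set.empty with
    | some o => some o
    | none => none

-- ===== PORT B =====
def fraOkB (regs : List Int) (succs : List (PySem.Set Int)) (order : List Int) (v : Int) :
    Bool :=
  let r := PySem.List.pyGetD regs v 0
  !(order.any (fun w =>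
      PySem.List.pyGetD regs w 0 == r &&
      (PySem.List.pyGetD succs w PySem.Set.empty).any
        (fun s => s != v && !(order.contains s))))

-- [v for v in range(nv) if v not in order and in_deg[v] == sum(1 for u in preds[v] if u in order) and ok(v, order)]
def fraAvailB (nv : Int) (regs : List Int) (preds succs : List (PySem.Set Int))
    (indeg : List Int) (order : List Int) : List Int :=
  (PySem.List.pyRange 0 nv 1).filter (fun v =>
    !(order.contains v) &&
    (PySem.List.pyGetD indeg v 0 ==
      (((PySem.List.pyGetD preds v PySem.Set.empty).countP
          (fun u => order.contains u) : Nat) : Int)) &&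
    fraOkB regs succs order v)

-- the `while stack:` loop; fuel (never exhausted, see fraG lemmas) makes it structural
def fraLoopB (nv : Int) (regs : List Int) (preds succs : List (PySem.Set Int))
    (indeg : List Int) : Nat → List (List Int) → List Int → Option (List Int)
  | 0, _, _ => none
  | _ + 1, [], _ => none
  | f + 1, cands :: rest, order =>
    if PySem.List.len order = nv then some order
    else
      match cands with
      | v :: cs =>
        fraLoopB nv regs preds succs indeg f
          (fraAvailB nv regs preds succs indeg (order ++ [v]) :: cs :: rest) (order ++ [v])
      | [] => fraLoopB nv regs preds succs indeg f rest order.dropLast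

-- fuel bound: fraG n k dominates the iterations of a frame opened with n-k slots filled
def fraG (n : Nat) : Nat → Nat
  | 0 => 1
  | k + 1 => 1 + n * (1 + fraG n k)

def brute_fra_alt (nv : Int) (edges : List (Int × Int)) (regs : List Int) :
    Option (List Int) :=
  if nv = 0 then some [] else
  fraLoopB nv regs (fraBuild nv edges).1 (fraBuild nv edges).2.1 (fraBuild nv edges).2.2
    (fraG nv.toNat (nv.toNat + 1))
    [fraAvailB nv regs (fraBuild nv edges).1 (fraBuild nv edges).2.1 (fraBuild nv edges).2.2 []]
    []

-- ===== PRECONDITION & SPEC =====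
-- Pre_ restricts to the natural domain of the task (except nv = 0, where both programs
-- return [] without reading edges or regs): every edge endpoint is a vertex id in [0, nv)
-- (outside it Python indexes lists out of range — an IndexError for v ≥ nv resp. accidental
-- wraparound for negative ids) and regs assigns a register to every vertex (a shorter regs
-- raises IndexError in ok() whenever it is consulted).
def Pre_brute_fra (nv : Int) (edges : List (Int × Int)) (regs : List Int) : Prop :=
  nv = 0 ∨
    ((∀ e ∈ edges, 0 ≤ e.1 ∧ e.1 < nv ∧ 0 ≤ e.2 ∧ e.2 < nv) ∧ nv ≤ (regs.length : Int))
instance (nv : Int) (edges : List (Int × Int)) (regs : List Int) :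
    Decidable (Pre_brute_fra nv edges regs) := by unfold Pre_brute_fra; infer_instance

def pvWitness_brute_fra : Int × (List (Int × Int)) × List Int := (3, [(1, 0), (2, 1)], [0, 1, 0])

def Spec_brute_fra (nv : Int) (edges : List (Int × Int)) (regs : List Int)
    (out : Option (List Int)) : Prop := out = brute_fra_alt nv edges regs
instance (nv : Int) (edges : List (Int × Int)) (regs : List Int) (out : Option (List Int)) :
    Decidable (Spec_brute_fra nv edges regs out) := by unfold Spec_brute_fra; infer_instance

-- ===== CLAIM (what is proved, stated in full; the proofs are below) =====
def Claim_equal_brute_fra : Prop := ∀ (nv : Int) (edges : List (Int × Int)) (regs : List Int), Dom_brute_fra nv edges regs → Pre_brute_fra nv edges regs → Spec_brute_fra nv edges regs (brute_fra nv edges regs)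

-- ===== LEMMAS AND PROOFS =====

-- indexing helpers (Int indices known to be in range)
theorem fra_pyGetD_pySetD {α : Type} (xs : List α) (i j : Int) (v d : α)
    (hi0 : 0 ≤ i) (_hi : i < (xs.length : Int)) (hj0 : 0 ≤ j) (hj : j < (xs.length : Int)) :
    PySem.List.pyGetD (PySem.List.pySetD xs i v) j d =
      if i = j then v else PySem.List.pyGetD xs j d := by
  rw [PySem.List.pySetD_of_nonneg _ _ hi0]
  rw [PySem.List.pyGetD_eq_getElem _ _ hj0 (by simpa [List.length_set] using hj),
      PySem.List.pyGetD_eq_getElem _ _ hj0 (by simpa using hj)]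
  rw [List.getElem_set]
  by_cases h : i = j
  · simp [h]
  · have hne : i.toNat ≠ j.toNat := by omega
    rw [if_neg hne, if_neg h]

theorem fra_pyGetD_replicate {α : Type} (n : Nat) (c d : α) (j : Int)
    (hj0 : 0 ≤ j) (_hj : j < (n : Int)) :
    PySem.List.pyGetD (List.replicate n c) j d = c := by
  rw [PySem.List.pyGetD_eq_getElem _ _ hj0 (by simpa using _hj)]
  exact List.getElem_replicate _

-- characterization of fraBuild under Pre_
def fraBuildChar (nv : Int) (edges : List (Int × Int))
    (b : List (PySem.Set Int) × List (PySem.Set Int) × List Int) : Prop :=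
  b.1.length = nv.toNat ∧ b.2.1.length = nv.toNat ∧ b.2.2.length = nv.toNat ∧
  ∀ i : Int, 0 ≤ i → i < nv →
    (PySem.List.pyGetD b.1 i PySem.Set.empty).Nodup ∧
    (∀ u, u ∈ PySem.List.pyGetD b.1 i PySem.Set.empty ↔ (i, u) ∈ edges) ∧
    (PySem.List.pyGetD b.2.1 i PySem.Set.empty).Nodup ∧
    (∀ x, x ∈ PySem.List.pyGetD b.2.1 i PySem.Set.empty ↔ (x, i) ∈ edges) ∧
    PySem.List.pyGetD b.2.2 i 0 = (edges.countP (fun e => e.1 == i) : Int)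

theorem fraBuildChar_fold (nv : Int) (es : List (Int × Int)) :
    ∀ (pre : List (Int × Int)) (acc : List (PySem.Set Int) × List (PySem.Set Int) × List Int),
    fraBuildChar nv pre acc →
    (∀ e ∈ es, 0 ≤ e.1 ∧ e.1 < nv ∧ 0 ≤ e.2 ∧ e.2 < nv) →
    fraBuildChar nv (pre ++ es)
      (es.foldl
        (fun st e =>
          (PySem.List.pySetD st.1 e.1 (PySem.Set.add (PySem.List.pyGetD st.1 e.1 PySem.Set.empty) e.2),
           PySem.List.pySetD st.2.1 e.2 (PySem.Set.add (PySem.List.pyGetD st.2.1 e.2 PySem.Set.empty) e.1),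
           PySem.List.pySetD st.2.2 e.1 (PySem.List.pyGetD st.2.2 e.1 0 + 1))) acc) := by
  induction es with
  | nil => intro pre acc h _; simpa using h
  | cons e es ih =>
    intro pre acc h hr
    have he := hr e (by simp)
    obtain ⟨h1, h2, h3, h4⟩ := h
    have hstep : fraBuildChar nv (pre ++ [e])
        (PySem.List.pySetD acc.1 e.1 (PySem.Set.add (PySem.List.pyGetD acc.1 e.1 PySem.Set.empty) e.2),
         PySem.List.pySetD acc.2.1 e.2 (PySem.Set.add (PySem.List.pyGetD acc.2.1 e.2 PySem.Set.empty) e.1),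
         PySem.List.pySetD acc.2.2 e.1 (PySem.List.pyGetD acc.2.2 e.1 0 + 1)) := by
      refine ⟨by simpa [PySem.List.length_pySetD] using h1,
              by simpa [PySem.List.length_pySetD] using h2,
              by simpa [PySem.List.length_pySetD] using h3, ?_⟩
      intro i hi0 hi
      obtain ⟨hnp, hmp, hns, hms, hcnt⟩ := h4 i hi0 hi
      have hlen1 : (acc.1.length : Int) = nv.toNat := by exact_mod_cast h1
      have hlen2 : (acc.2.1.length : Int) = nv.toNat := by exact_mod_cast h2
      have hlen3 : (acc.2.2.length : Int) = nv.toNat := by exact_mod_cast h3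
      have hnv : (nv.toNat : Int) = nv := by omega
      refine ⟨?_, ?_, ?_, ?_, ?_⟩
      · rw [fra_pyGetD_pySetD _ _ _ _ _ (by omega) (by omega) hi0 (by omega)]
        split_ifs with hie
        · subst hie; exact PySem.Set.nodup_add _ _ hnp
        · exact hnp
      · intro u
        rw [fra_pyGetD_pySetD _ _ _ _ _ (by omega) (by omega) hi0 (by omega)]
        split_ifs with hie
        · subst hie
          rw [PySem.Set.mem_add]
          simp only [hmp, List.mem_append, List.mem_singleton]
          constructor
          · rintro (h | h)
            · exact Or.inl h
            · exact Or.inr (by rw [h])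
          · rintro (h | h)
            · exact Or.inl h
            · exact Or.inr (congrArg Prod.snd h)
        · simp only [hmp, List.mem_append, List.mem_singleton]
          constructor
          · exact fun h => Or.inl h
          · rintro (h | h)
            · exact h
            · exact absurd (congrArg Prod.fst h).symm hie
      · rw [fra_pyGetD_pySetD _ _ _ _ _ (by omega) (by omega) hi0 (by omega)]
        split_ifs with hie
        · subst hie; exact PySem.Set.nodup_add _ _ hns
        · exact hns
      · intro x
        rw [fra_pyGetD_pySetD _ _ _ _ _ (by omega) (by omega) hi0 (by omega)]
        split_ifs with hie
        · subst hie
          rw [PySem.Set.mem_add]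
          simp only [hms, List.mem_append, List.mem_singleton]
          constructor
          · rintro (h | h)
            · exact Or.inl h
            · exact Or.inr (by rw [h])
          · rintro (h | h)
            · exact Or.inl h
            · exact Or.inr (congrArg Prod.fst h)
        · simp only [hms, List.mem_append, List.mem_singleton]
          constructor
          · exact fun h => Or.inl h
          · rintro (h | h)
            · exact h
            · exact absurd (congrArg Prod.snd h).symm hie
      · rw [fra_pyGetD_pySetD _ _ _ _ _ (by omega) (by omega) hi0 (by omega)]
        rw [List.countP_append]
        split_ifs with hie
        · subst hie
          have : [e].countP (fun e' => e'.1 == (e.1 : Int)) = 1 := by simp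
          rw [hcnt, this]; push_cast; ring
        · have : [e].countP (fun e' => e'.1 == i) = 0 := by
            simp only [List.countP_singleton]
            simp only [beq_iff_eq]
            simp [hie]
          rw [hcnt, this]; push_cast; ring
    have := ih (pre ++ [e]) _ hstep (fun e' he' => hr e' (by simp [he']))
    simpa using this

theorem fraBuildChar_main (nv : Int) (edges : List (Int × Int))
    (hr : ∀ e ∈ edges, 0 ≤ e.1 ∧ e.1 < nv ∧ 0 ≤ e.2 ∧ e.2 < nv) :
    fraBuildChar nv edges (fraBuild nv edges) := by
  have init : fraBuildChar nv []
      (List.replicate nv.toNat PySem.Set.empty, List.replicate nv.toNat PySem.Set.empty,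
       List.replicate nv.toNat (0 : Int)) := by
    refine ⟨by simp, by simp, by simp, ?_⟩
    intro i hi0 hi
    have hn : i < ((nv.toNat : Nat) : Int) := by omega
    rw [fra_pyGetD_replicate nv.toNat (PySem.Set.empty) (PySem.Set.empty) i hi0 hn,
        fra_pyGetD_replicate nv.toNat (0 : Int) 0 i hi0 hn]
    simp [PySem.Set.empty]
  have := fraBuildChar_fold nv edges [] _ init hr
  simpa [fraBuild] using this

-- state characterisations: A's maintained done/rem/live as functions of `order`
def fraDoneChar (done : PySem.Set Int) (o : List Int) : Prop := ∀ x : Int, x ∈ done ↔ x ∈ o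

def fraRemChar (S : List (PySem.Set Int)) (I rem : List Int) (nv : Int) (o : List Int) : Prop :=
  rem.length = nv.toNat ∧ ∀ j : Int, 0 ≤ j → j < nv →
    PySem.List.pyGetD rem j 0 = PySem.List.pyGetD I j 0 -
      (o.countP (fun u => (PySem.List.pyGetD S u PySem.Set.empty).contains j) : Int)

def fraLiveChar (S : List (PySem.Set Int)) (live : PySem.Set Int) (o : List Int) : Prop :=
  ∀ x : Int, x ∈ live ↔ (x ∈ o ∧ ∃ s ∈ PySem.List.pyGetD S x PySem.Set.empty, s ∉ o)

theorem fraDoneChar_add (done : PySem.Set Int) (o : List Int) (v : Int)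
    (h : fraDoneChar done o) : fraDoneChar (PySem.Set.add done v) (o ++ [v]) := by
  intro x
  rw [PySem.Set.mem_add]
  simp [h x, List.mem_append]

theorem fraRemUpd_fold (nv : Int) (sv : List Int) (hnd : sv.Nodup)
    (hrange : ∀ s ∈ sv, 0 ≤ s ∧ s < nv) :
    ∀ rem : List Int, rem.length = nv.toNat →
      (sv.foldl (fun rm s => PySem.List.pySetD rm s (PySem.List.pyGetD rm s 0 - 1)) rem).length
          = rem.length ∧
      ∀ j : Int, 0 ≤ j → j < nv →
        PySem.List.pyGetD
            (sv.foldl (fun rm s => PySem.List.pySetD rm s (PySem.List.pyGetD rm s 0 - 1)) rem) j 0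
          = PySem.List.pyGetD rem j 0 - (if j ∈ sv then 1 else 0) := by
  induction sv with
  | nil => intro rem hlen; simp
  | cons s sv ih =>
    intro rem hlen
    have hs := hrange s (by simp)
    have hlen1 : (PySem.List.pySetD rem s (PySem.List.pyGetD rem s 0 - 1)).length = rem.length :=
      PySem.List.length_pySetD rem s _
    have hnd' : sv.Nodup := hnd.of_cons
    have hsm : s ∉ sv := by
      intro hmem; exact (List.nodup_cons.mp hnd).1 hmem
    obtain ⟨ihlen, ihget⟩ := ih hnd' (fun x hx => hrange x (by simp [hx]))
      (PySem.List.pySetD rem s (PySem.List.pyGetD rem s 0 - 1)) (by omega)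
    refine ⟨by simpa [List.foldl_cons] using (by omega : _ = rem.length), ?_⟩
    · intro j hj0 hj
      rw [List.foldl_cons]
      rw [ihget j hj0 hj]
      rw [fra_pyGetD_pySetD rem s j _ 0 (by omega) (by omega) hj0 (by omega)]
      by_cases hjs : s = j
      · subst hjs
        simp [hsm]
      · have : ¬ (j = s) := fun h => hjs h.symm
        simp [hjs, this]

theorem fraRemChar_upd (nv : Int) (S : List (PySem.Set Int)) (I rem : List Int)
    (o : List Int) (v : Int)
    (hsv_nd : (PySem.List.pyGetD S v PySem.Set.empty).Nodup)
    (hsv_r : ∀ s ∈ PySem.List.pyGetD S v PySem.Set.empty, 0 ≤ s ∧ s < nv)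
    (h : fraRemChar S I rem nv o) :
    fraRemChar S I (fraRemUpd S rem v) nv (o ++ [v]) := by
  obtain ⟨hlen, hget⟩ := h
  obtain ⟨hlen', hget'⟩ := fraRemUpd_fold nv _ hsv_nd hsv_r rem hlen
  refine ⟨by rw [fraRemUpd]; omega, ?_⟩
  intro j hj0 hj
  rw [fraRemUpd, hget' j hj0 hj, hget j hj0 hj, List.countP_append]
  have hcnt1 : List.countP (fun u => (PySem.List.pyGetD S u PySem.Set.empty).contains j) [v]
      = if j ∈ PySem.List.pyGetD S v PySem.Set.empty then 1 else 0 := by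
    simp [List.countP_cons]
  rw [hcnt1]
  split_ifs with hm <;> push_cast <;> ring

theorem fraLiveChar_upd (S : List (PySem.Set Int)) (live done : PySem.Set Int)
    (o : List Int) (v : Int)
    (hd : fraDoneChar done o) (hl : fraLiveChar S live o) (hvo : v ∉ o) :
    fraLiveChar S (fraLiveUpd S live (PySem.Set.add done v) v) (o ++ [v]) := by
  intro x
  have hdone' : ∀ y : Int, y ∈ PySem.Set.add done v ↔ (y ∈ o ∨ y = v) := by
    intro y; rw [PySem.Set.mem_add]; simp [hd y]
  have hdead : ∀ w : Int,
      w ∈ live.filter (fun w =>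
        !(PySem.List.pyGetD S w PySem.Set.empty).isEmpty &&
        PySem.Set.issubset (PySem.List.pyGetD S w PySem.Set.empty) (PySem.Set.add done v))
      ↔ (w ∈ live ∧ ((PySem.List.pyGetD S w PySem.Set.empty) ≠ [] ∧
          ∀ s ∈ PySem.List.pyGetD S w PySem.Set.empty, s ∈ o ∨ s = v)) := by
    intro w
    rw [List.mem_filter, Bool.and_eq_true]
    constructor
    · rintro ⟨hwl, hne, hss⟩
      refine ⟨hwl, ?_, ?_⟩
      · intro hnil
        rw [hnil] at hne; simp at hne
      · intro s hs
        exact (hdone' s).mp (((PySem.Set.issubset_iff _ _).mp hss) s hs)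
    · rintro ⟨hwl, ⟨hne, hss⟩⟩
      refine ⟨hwl, ?_, ?_⟩
      · simpa [List.isEmpty_iff] using hne
      · exact (PySem.Set.issubset_iff _ _).mpr (fun s hs => (hdone' s).mpr (hss s hs))
  unfold fraLiveUpd
  by_cases hx : x = v
  · subst hx
    have hxl : x ∉ live := fun hm => hvo ((hl x).mp hm).1
    have hxl1 : x ∉ PySem.Set.diff live
        (live.filter (fun w =>
          !(PySem.List.pyGetD S w PySem.Set.empty).isEmpty &&
          PySem.Set.issubset (PySem.List.pyGetD S w PySem.Set.empty) (PySem.Set.add done x))) := by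
      intro hm; exact hxl ((PySem.Set.mem_diff _ _ _).mp hm).1
    split_ifs with hc
    · rw [Bool.and_eq_true, Bool.not_eq_true', Bool.not_eq_true'] at hc
      obtain ⟨hne, hnss⟩ := hc
      have hex : ∃ s ∈ PySem.List.pyGetD S x PySem.Set.empty, ¬(s ∈ o ∨ s = x) := by
        by_contra hall
        push Not at hall
        have : PySem.Set.issubset (PySem.List.pyGetD S x PySem.Set.empty)
            (PySem.Set.add done x) = true :=
          (PySem.Set.issubset_iff _ _).mpr (fun s hs => (hdone' s).mpr (hall s hs))
        rw [this] at hnss; cases hnss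
      rw [PySem.Set.mem_add]
      simp only [hxl1, false_or]
      constructor
      · intro _
        obtain ⟨s, hs, hso⟩ := hex
        exact ⟨by simp, s, hs, by simpa using hso⟩
      · intro _; trivial
    · rw [Bool.and_eq_true] at hc
      push Not at hc
      constructor
      · intro hm; exact absurd hm hxl1
      · rintro ⟨_, s, hs, hso⟩
        exfalso
        have hne : (PySem.List.pyGetD S x PySem.Set.empty).isEmpty = false := by
          cases hEmp : (PySem.List.pyGetD S x PySem.Set.empty).isEmpty with
          | false => rfl
          | true =>
            rw [List.isEmpty_iff] at hEmp
            rw [hEmp] at hs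
            cases hs
        have harg : (!(PySem.List.pyGetD S x PySem.Set.empty).isEmpty) = true := by
          rw [hne]; rfl
        have := hc harg
        have hsubT : (PySem.List.pyGetD S x PySem.Set.empty).issubset (PySem.Set.add done x)
            = true := by
          revert this
          cases h2 : (PySem.List.pyGetD S x PySem.Set.empty).issubset (PySem.Set.add done x) <;>
            simp
        have hss := (PySem.Set.issubset_iff _ _).mp hsubT
        have hor := (hdone' s).mp (hss s hs)
        have hso' : ¬(s ∈ o ∨ s = x) := by simpa using hso
        exact hso' hor
  · have hmm : ∀ b : PySem.Set Int,
        (x ∈ (if !(PySem.List.pyGetD S v PySem.Set.empty).isEmpty &&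
            !PySem.Set.issubset (PySem.List.pyGetD S v PySem.Set.empty) (PySem.Set.add done v)
          then PySem.Set.add b v else b)) ↔ x ∈ b := by
      intro b
      split_ifs
      · rw [PySem.Set.mem_add]; simp [hx]
      · rfl
    rw [hmm, PySem.Set.mem_diff]
    rw [hdead x]
    constructor
    · rintro ⟨hxlive, hnd⟩
      obtain ⟨hxo, s0, hs0, hs0o⟩ := (hl x).mp hxlive
      have hex : ∃ s ∈ PySem.List.pyGetD S x PySem.Set.empty, ¬(s ∈ o ∨ s = v) := by
        by_contra hall
        push Not at hall
        exact hnd ⟨hxlive, List.ne_nil_of_mem hs0, fun s hs => hall s hs⟩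
      obtain ⟨s, hs, hso⟩ := hex
      exact ⟨by simp [hxo], s, hs, by simpa using hso⟩
    · rintro ⟨hxov, s, hs, hso⟩
      have hxo : x ∈ o := by
        rcases List.mem_append.mp hxov with h | h
        · exact h
        · exact absurd (by simpa using h) hx
      have hso' : ¬(s ∈ o ∨ s = v) := by simpa using hso
      have hxlive : x ∈ live := (hl x).mpr ⟨hxo, s, hs, fun h => hso' (Or.inl h)⟩
      refine ⟨hxlive, ?_⟩
      rintro ⟨_, _, hall⟩
      exact hso' (hall s hs)

theorem fraOk_eq (regs : List Int) (S : List (PySem.Set Int)) (done live : PySem.Set Int)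
    (o : List Int) (v : Int) (hd : fraDoneChar done o) (hl : fraLiveChar S live o) :
    fraOkA regs S done live v = fraOkB regs S o v := by
  unfold fraOkA fraOkB
  show (!live.any (fun w =>
      PySem.List.pyGetD regs w 0 == PySem.List.pyGetD regs v 0 &&
      (PySem.List.pyGetD S w PySem.Set.empty).any
        (fun s => s != v && !(PySem.Set.contains done s))))
    = (!o.any (fun w =>
      PySem.List.pyGetD regs w 0 == PySem.List.pyGetD regs v 0 &&
      (PySem.List.pyGetD S w PySem.Set.empty).any
        (fun s => s != v && !(o.contains s))))
  have hc : ∀ s : Int, PySem.Set.contains done s = o.contains s := by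
    intro s
    rw [Bool.eq_iff_iff, PySem.Set.contains_iff, List.contains_iff_mem]
    exact hd s
  have key :
      live.any (fun w =>
        PySem.List.pyGetD regs w 0 == PySem.List.pyGetD regs v 0 &&
        (PySem.List.pyGetD S w PySem.Set.empty).any
          (fun s => s != v && !(PySem.Set.contains done s)))
      = o.any (fun w =>
        PySem.List.pyGetD regs w 0 == PySem.List.pyGetD regs v 0 &&
        (PySem.List.pyGetD S w PySem.Set.empty).any
          (fun s => s != v && !(o.contains s))) := by
    rw [Bool.eq_iff_iff, List.any_eq_true, List.any_eq_true]
    constructor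
    · rintro ⟨w, hw, hp⟩
      simp only [hc] at hp
      exact ⟨w, ((hl w).mp hw).1, hp⟩
    · rintro ⟨w, hw, hp⟩
      have hp' := hp
      rw [Bool.and_eq_true, List.any_eq_true] at hp'
      obtain ⟨-, s, hs, hsp⟩ := hp'
      rw [Bool.and_eq_true, Bool.not_eq_true', ← Bool.not_eq_true] at hsp
      have hsno : s ∉ o := by
        intro hmem
        exact hsp.2 (by simpa [List.contains_iff_mem] using hmem)
      refine ⟨w, (hl w).mpr ⟨hw, s, hs, hsno⟩, ?_⟩
      simp only [hc]
      exact hp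
  rw [key]

theorem fraCountSwap (nv : Int) (edges : List (Int × Int))
    (P S : List (PySem.Set Int)) (I : List Int)
    (hb : fraBuildChar nv edges (P, S, I)) (o : List Int) (hond : o.Nodup)
    (hor : ∀ x ∈ o, 0 ≤ x ∧ x < nv) (v : Int) (hv0 : 0 ≤ v) (hv : v < nv) :
    o.countP (fun u => (PySem.List.pyGetD S u PySem.Set.empty).contains v)
      = (PySem.List.pyGetD P v PySem.Set.empty).countP (fun u => o.contains u) := by
  obtain ⟨hl1, hl2, hl3, hchar⟩ := hb
  obtain ⟨hPnd, hPmem, _, _, _⟩ := hchar v hv0 hv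
  rw [List.countP_eq_length_filter, List.countP_eq_length_filter]
  apply List.Perm.length_eq
  rw [List.perm_ext_iff_of_nodup (hond.filter _) (hPnd.filter _)]
  intro x
  rw [List.mem_filter, List.mem_filter]
  constructor
  · rintro ⟨hxo, hc⟩
    obtain ⟨hx0, hxnv⟩ := hor x hxo
    obtain ⟨_, _, _, hSmem, _⟩ := hchar x hx0 hxnv
    have hvS : v ∈ PySem.List.pyGetD S x PySem.Set.empty := (PySem.Set.contains_iff _ _).mp hc
    have hedge : (v, x) ∈ edges := (hSmem v).mp hvS
    exact ⟨(hPmem x).mpr hedge, (List.contains_iff_mem).mpr hxo⟩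
  · rintro ⟨hxP, hc⟩
    have hxo : x ∈ o := (List.contains_iff_mem).mp hc
    obtain ⟨hx0, hxnv⟩ := hor x hxo
    obtain ⟨_, _, _, hSmem, _⟩ := hchar x hx0 hxnv
    have hedge : (v, x) ∈ edges := (hPmem x).mp hxP
    exact ⟨hxo, (PySem.Set.contains_iff _ _).mpr ((hSmem v).mpr hedge)⟩

theorem fraAvail_eq (nv : Int) (edges : List (Int × Int)) (regs : List Int)
    (P S : List (PySem.Set Int)) (I : List Int)
    (hb : fraBuildChar nv edges (P, S, I))
    (done rem live : PySem.Set Int) (o : List Int)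
    (hd : fraDoneChar done o) (hr : fraRemChar S I rem nv o) (hl : fraLiveChar S live o)
    (hond : o.Nodup) (hor : ∀ x ∈ o, 0 ≤ x ∧ x < nv) :
    fraAvailA nv regs S done rem live = fraAvailB nv regs P S I o := by
  unfold fraAvailA fraAvailB
  apply List.filter_congr
  intro v hvmem
  obtain ⟨hv0, hvnv⟩ := PySem.List.mem_pyRange_one.mp hvmem
  have c1 : (PySem.Set.contains done v) = (o.contains v) := by
    rw [Bool.eq_iff_iff, PySem.Set.contains_iff, List.contains_iff_mem]
    exact hd v
  have c2 : (PySem.List.pyGetD rem v 0 == 0)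
      = (PySem.List.pyGetD I v 0 ==
          (((PySem.List.pyGetD P v PySem.Set.empty).countP (fun u => o.contains u) : Nat) : Int)) := by
    rw [Bool.eq_iff_iff, beq_iff_eq, beq_iff_eq]
    rw [hr.2 v hv0 hvnv, ← fraCountSwap nv edges P S I hb o hond hor v hv0 hvnv]
    omega
  rw [c1, c2, fraOk_eq regs S done live o v hd hl]

theorem fraLoopB_nilstack (nv : Int) (regs : List Int) (P S : List (PySem.Set Int))
    (I : List Int) : ∀ (f : Nat) (o : List Int), fraLoopB nv regs P S I f [] o = none := by
  intro f o; cases f <;> simp [fraLoopB]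

theorem fraAvailB_mem (nv : Int) (regs : List Int) (P S : List (PySem.Set Int))
    (I : List Int) (o : List Int) (w : Int) (h : w ∈ fraAvailB nv regs P S I o) :
    (0 ≤ w ∧ w < nv) ∧ w ∉ o := by
  unfold fraAvailB at h
  obtain ⟨hr, hp⟩ := List.mem_filter.mp h
  refine ⟨PySem.List.mem_pyRange_one.mp hr, ?_⟩
  rw [Bool.and_eq_true, Bool.and_eq_true] at hp
  have h1 := hp.1.1
  rw [Bool.not_eq_true'] at h1
  intro hmem
  rw [(List.contains_iff_mem).mpr hmem] at h1
  cases h1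

theorem fraAvailB_len (nv : Int) (regs : List Int) (P S : List (PySem.Set Int))
    (I : List Int) (o : List Int) : (fraAvailB nv regs P S I o).length ≤ nv.toNat := by
  unfold fraAvailB
  refine le_trans (List.length_filter_le _ _) ?_
  rw [PySem.List.length_pyRange_one]
  omega

theorem fraS_props (nv : Int) (edges : List (Int × Int)) (P S : List (PySem.Set Int))
    (I : List Int) (hb : fraBuildChar nv edges (P, S, I))
    (hPre : ∀ e ∈ edges, 0 ≤ e.1 ∧ e.1 < nv ∧ 0 ≤ e.2 ∧ e.2 < nv)
    (v : Int) (hv0 : 0 ≤ v) (hv : v < nv) :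
    (PySem.List.pyGetD S v PySem.Set.empty).Nodup ∧
      ∀ s ∈ PySem.List.pyGetD S v PySem.Set.empty, 0 ≤ s ∧ s < nv := by
  obtain ⟨-, -, -, hchar⟩ := hb
  obtain ⟨-, -, hnd, hmem, -⟩ := hchar v hv0 hv
  refine ⟨hnd, fun s hs => ?_⟩
  have he := hPre _ ((hmem s).mp hs)
  exact ⟨he.1, he.2.1⟩

-- the bridge: B's loop on a frame equals A's candidate loop, then continues on the rest
theorem fraMain (nv : Int) (edges : List (Int × Int)) (regs : List Int)
    (P S : List (PySem.Set Int)) (I : List Int)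
    (hb : fraBuildChar nv edges (P, S, I))
    (hPre : ∀ e ∈ edges, 0 ≤ e.1 ∧ e.1 < nv ∧ 0 ≤ e.2 ∧ e.2 < nv) :
    ∀ (k : Nat) (cs : List Int) (o : List Int) (done rem live : PySem.Set Int)
      (rest : List (List Int)) (f : Nat),
      fraDoneChar done o → fraRemChar S I rem nv o → fraLiveChar S live o →
      o.Nodup → (∀ x ∈ o, 0 ≤ x ∧ x < nv) →
      nv.toNat ≤ o.length + k →
      (∀ v ∈ cs, (0 ≤ v ∧ v < nv) ∧ v ∉ o) →
      1 + cs.length * (1 + fraG nv.toNat k) ≤ f →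
      ∃ f', f ≤ f' + (1 + cs.length * (1 + fraG nv.toNat k)) ∧
        fraLoopB nv regs P S I f (cs :: rest) o =
          (if (o.length : Int) = nv then some o
           else
             match fraTryA (fraGoA nv regs S k) S done o rem live cs with
             | some r => some r
             | none => fraLoopB nv regs P S I f' rest o.dropLast) := by
  intro k
  induction k with
  | zero =>
    intro cs o done rem live rest f hd hr hl hond hor hslack hcs hf
    match cs with
    | [] =>
      have hfpos : 1 ≤ f := le_trans (by omega) hf
      obtain ⟨f₀, rfl⟩ : ∃ f₀, f = f₀ + 1 := ⟨f - 1, by omega⟩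
      refine ⟨f₀, by omega, ?_⟩
      simp only [fraLoopB, PySem.List.len_eq, fraTryA]
    | v :: cs' =>
      exfalso
      obtain ⟨⟨hv0, hvnv⟩, hvo⟩ := hcs v (by simp)
      have hnodup : (v :: o).Nodup := List.nodup_cons.mpr ⟨hvo, hond⟩
      have hsub : (v :: o) ⊆ PySem.List.pyRange 0 nv 1 := by
        intro x hx
        rcases List.mem_cons.mp hx with h | h
        · subst h; exact PySem.List.mem_pyRange_one.mpr ⟨hv0, hvnv⟩
        · obtain ⟨h1, h2⟩ := hor x h
          exact PySem.List.mem_pyRange_one.mpr ⟨h1, h2⟩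
      have hle := List.Subperm.length_le (List.subperm_of_subset hnodup hsub)
      rw [PySem.List.length_pyRange_one] at hle
      simp only [List.length_cons] at hle
      omega
  | succ k ih =>
    intro cs
    induction cs with
    | nil =>
      intro o done rem live rest f hd hr hl hond hor hslack hcs hf
      have hfpos : 1 ≤ f := le_trans (by omega) hf
      obtain ⟨f₀, rfl⟩ : ∃ f₀, f = f₀ + 1 := ⟨f - 1, by omega⟩
      refine ⟨f₀, by omega, ?_⟩
      simp only [fraLoopB, PySem.List.len_eq, fraTryA]
    | cons v cs' ihcs =>
      intro o done rem live rest f hd hr hl hond hor hslack hcs hf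
      have hlc : (v :: cs').length = cs'.length + 1 := by simp
      have hfpos : 1 ≤ f := le_trans (by omega) hf
      obtain ⟨f₀, rfl⟩ : ∃ f₀, f = f₀ + 1 := ⟨f - 1, by omega⟩
      by_cases hlen : (o.length : Int) = nv
      · refine ⟨f₀ + 1, by omega, ?_⟩
        rw [if_pos hlen]
        simp only [fraLoopB, PySem.List.len_eq]
        rw [if_pos hlen]
      · -- take v : one choose step
        obtain ⟨⟨hv0, hvnv⟩, hvo⟩ := hcs v (by simp)
        obtain ⟨hSnd, hSr⟩ := fraS_props nv edges P S I hb hPre v hv0 hvnv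
        have hd' := fraDoneChar_add done o v hd
        have hr' := fraRemChar_upd nv S I rem o v hSnd hSr hr
        have hl' := fraLiveChar_upd S live done o v hd hl hvo
        have hond' : (o ++ [v]).Nodup := by
          simp [List.nodup_append, hond]
          intro a ha hav
          exact hvo (hav ▸ ha)
        have hor' : ∀ x ∈ o ++ [v], 0 ≤ x ∧ x < nv := by
          intro x hx
          rcases List.mem_append.mp hx with h | h
          · exact hor x h
          · simp at h; subst h; exact ⟨hv0, hvnv⟩
        have hslack' : nv.toNat ≤ (o ++ [v]).length + k := by
          rw [List.length_append]; simp; omega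
        have hcs' : ∀ w ∈ fraAvailB nv regs P S I (o ++ [v]), (0 ≤ w ∧ w < nv) ∧ w ∉ o ++ [v] :=
          fun w hw => fraAvailB_mem nv regs P S I (o ++ [v]) w hw
        have hL := fraAvailB_len nv regs P S I (o ++ [v])
        have hg1 : fraG nv.toNat (k + 1) = 1 + nv.toNat * (1 + fraG nv.toNat k) := rfl
        have hFCa : 1 + (fraAvailB nv regs P S I (o ++ [v])).length * (1 + fraG nv.toNat k)
            ≤ fraG nv.toNat (k + 1) := by
          rw [hg1]
          exact Nat.add_le_add_left (Nat.mul_le_mul_right _ hL) 1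
        have hexpand : (cs'.length + 1) * (1 + fraG nv.toNat (k + 1))
            = cs'.length * (1 + fraG nv.toNat (k + 1)) + (1 + fraG nv.toNat (k + 1)) := by ring
        rw [hlc] at hf
        rw [hexpand] at hf
        have hf0a : 1 + (fraAvailB nv regs P S I (o ++ [v])).length * (1 + fraG nv.toNat k)
            ≤ f₀ := le_trans hFCa (by omega)
        obtain ⟨f₁, hb1, heq1⟩ := ih (fraAvailB nv regs P S I (o ++ [v])) (o ++ [v])
          (PySem.Set.add done v) (fraRemUpd S rem v)
          (fraLiveUpd S live (PySem.Set.add done v) v) (cs' :: rest) f₀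
          hd' hr' hl' hond' hor' hslack' hcs' hf0a
        have step : fraLoopB nv regs P S I (f₀ + 1) ((v :: cs') :: rest) o
            = fraLoopB nv regs P S I f₀
                (fraAvailB nv regs P S I (o ++ [v]) :: cs' :: rest) (o ++ [v]) := by
          simp only [fraLoopB, PySem.List.len_eq, if_neg hlen]
        have havail : fraAvailA nv regs S (PySem.Set.add done v) (fraRemUpd S rem v)
              (fraLiveUpd S live (PySem.Set.add done v) v)
            = fraAvailB nv regs P S I (o ++ [v]) :=
          fraAvail_eq nv edges regs P S I hb _ _ _ _ hd' hr' hl' hond' hor'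
        have hAstep : fraTryA (fraGoA nv regs S (k + 1)) S done o rem live (v :: cs')
            = match fraGoA nv regs S (k + 1) (PySem.Set.add done v) (o ++ [v])
                  (fraRemUpd S rem v) (fraLiveUpd S live (PySem.Set.add done v) v) with
              | some res => some res
              | none => fraTryA (fraGoA nv regs S (k + 1)) S done o rem live cs' := rfl
        by_cases hlen' : ((o ++ [v]).length : Int) = nv
        · have hgoA_pos : fraGoA nv regs S (k + 1) (PySem.Set.add done v) (o ++ [v])
              (fraRemUpd S rem v) (fraLiveUpd S live (PySem.Set.add done v) v)
              = some (o ++ [v]) := by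
            simp only [fraGoA, PySem.List.len_eq]
            rw [if_pos hlen']
          refine ⟨f₀ + 1, by omega, ?_⟩
          rw [if_neg hlen, hAstep, hgoA_pos]
          rw [step, heq1, if_pos hlen']
        · have hgoA_neg : fraGoA nv regs S (k + 1) (PySem.Set.add done v) (o ++ [v])
              (fraRemUpd S rem v) (fraLiveUpd S live (PySem.Set.add done v) v)
              = fraTryA (fraGoA nv regs S k) S (PySem.Set.add done v) (o ++ [v])
                  (fraRemUpd S rem v) (fraLiveUpd S live (PySem.Set.add done v) v)
                  (fraAvailB nv regs P S I (o ++ [v])) := by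
            simp only [fraGoA, PySem.List.len_eq]
            rw [if_neg hlen', havail]
          cases hres : fraTryA (fraGoA nv regs S k) S (PySem.Set.add done v) (o ++ [v])
              (fraRemUpd S rem v) (fraLiveUpd S live (PySem.Set.add done v) v)
              (fraAvailB nv regs P S I (o ++ [v])) with
          | some r =>
            refine ⟨f₀ + 1, by omega, ?_⟩
            rw [if_neg hlen, hAstep, hgoA_neg, hres]
            rw [step, heq1, if_neg hlen', hres]
          | none =>
            have hf1 : 1 + cs'.length * (1 + fraG nv.toNat (k + 1)) ≤ f₁ := by omega
            obtain ⟨f₂, hb2, heq2⟩ := ihcs o done rem live rest f₁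
              hd hr hl hond hor hslack (fun w hw => hcs w (by simp [hw])) hf1
            refine ⟨f₂, ?_, ?_⟩
            · rw [hlc, hexpand]; omega
            · rw [if_neg hlen, hAstep, hgoA_neg, hres]
              rw [step, heq1, if_neg hlen', hres, List.dropLast_concat, heq2, if_neg hlen]

-- ===== VERDICT (by name: the statement is the Claim_ definition above) =====
theorem brute_fra_spec : Claim_equal_brute_fra := by
  intro nv edges regs hdom hpre
  unfold Spec_brute_fra
  rcases hpre with h0 | ⟨hE, hR⟩
  · subst h0
    simp [brute_fra, brute_fra_alt]
  · by_cases h0 : nv = 0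
    · subst h0
      simp [brute_fra, brute_fra_alt]
    · have hb' := fraBuildChar_main nv edges hE
      have hb : fraBuildChar nv edges
          ((fraBuild nv edges).1, (fraBuild nv edges).2.1, (fraBuild nv edges).2.2) := hb'
      have hd0 : fraDoneChar PySem.Set.empty [] := by intro x; simp [PySem.Set.empty]
      have hr0 : fraRemChar (fraBuild nv edges).2.1 (fraBuild nv edges).2.2
          (fraBuild nv edges).2.2 nv [] := by
        refine ⟨hb.2.2.1, ?_⟩
        intro j h1 h2; simp
      have hl0 : fraLiveChar (fraBuild nv edges).2.1 PySem.Set.empty [] := by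
        intro x; simp [PySem.Set.empty]
      have havail0 : fraAvailA nv regs (fraBuild nv edges).2.1 PySem.Set.empty
            (fraBuild nv edges).2.2 PySem.Set.empty
          = fraAvailB nv regs (fraBuild nv edges).1 (fraBuild nv edges).2.1
              (fraBuild nv edges).2.2 [] :=
        fraAvail_eq nv edges regs (fraBuild nv edges).1 (fraBuild nv edges).2.1
          (fraBuild nv edges).2.2 hb _ _ _ _ hd0 hr0 hl0 List.nodup_nil
          (by intro x hx; cases hx)
      have hL0 := fraAvailB_len nv regs (fraBuild nv edges).1 (fraBuild nv edges).2.1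
        (fraBuild nv edges).2.2 []
      have hfuel : 1 + (fraAvailB nv regs (fraBuild nv edges).1 (fraBuild nv edges).2.1
            (fraBuild nv edges).2.2 []).length * (1 + fraG nv.toNat nv.toNat)
          ≤ fraG nv.toNat (nv.toNat + 1) := by
        have hg : fraG nv.toNat (nv.toNat + 1)
            = 1 + nv.toNat * (1 + fraG nv.toNat nv.toNat) := rfl
        rw [hg]
        exact Nat.add_le_add_left (Nat.mul_le_mul_right _ hL0) 1
      obtain ⟨f', hbnd, heq⟩ := fraMain nv edges regs (fraBuild nv edges).1
        (fraBuild nv edges).2.1 (fraBuild nv edges).2.2 hb hE nv.toNat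
        (fraAvailB nv regs (fraBuild nv edges).1 (fraBuild nv edges).2.1
          (fraBuild nv edges).2.2 [])
        [] PySem.Set.empty (fraBuild nv edges).2.2 PySem.Set.empty [] 
        (fraG nv.toNat (nv.toNat + 1)) hd0 hr0 hl0 List.nodup_nil
        (by intro x hx; cases hx) (by simp)
        (fun w hw => fraAvailB_mem nv regs _ _ _ [] w hw) hfuel
      have hlen0 : ¬((([] : List Int).length : Int) = nv) := by
        intro h; apply h0; simpa using h.symm
      rw [if_neg hlen0] at heq
      have hgo : fraGoA nv regs (fraBuild nv edges).2.1 (nv.toNat + 1) PySem.Set.empty []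
            (fraBuild nv edges).2.2 PySem.Set.empty
          = fraTryA (fraGoA nv regs (fraBuild nv edges).2.1 nv.toNat)
              (fraBuild nv edges).2.1 PySem.Set.empty [] (fraBuild nv edges).2.2
              PySem.Set.empty
              (fraAvailB nv regs (fraBuild nv edges).1 (fraBuild nv edges).2.1
                (fraBuild nv edges).2.2 []) := by
        simp only [fraGoA, PySem.List.len_eq]
        rw [if_neg hlen0, havail0]
      unfold brute_fra brute_fra_alt
      rw [if_neg h0, hgo, heq]
      cases fraTryA (fraGoA nv regs (fraBuild nv edges).2.1 nv.toNat)
          (fraBuild nv edges).2.1 PySem.Set.empty [] (fraBuild nv edges).2.2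
          PySem.Set.empty
          (fraAvailB nv regs (fraBuild nv edges).1 (fraBuild nv edges).2.1
            (fraBuild nv edges).2.2 []) with
      | some r => rw [if_neg h0]
      | none => rw [fraLoopB_nilstack, if_neg h0]
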